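-- pv_equiv track=rewrite | github.com/shivsharcode/Problem-Solving | CODECHEF/Candies(1).py | solution
-- ===== SOURCE A (Python) =====
-- def solution(arr):
--
--     myDict = dict()
--
--     for i in range(len(arr)):
--         if arr[i] in myDict:
--             myDict[arr[i]] += 1
--         else:
--             myDict[arr[i]] = 1
--
--     for i in myDict:
--         if myDict[i] > 2:
--             return "NO"
--
--
--     return "YES"
-- ===== SOURCE B (Python) =====
-- def solution(arr):
--     s = sorted(arr)
--     return "NO" if any(x == z for x, z in zip(s, s[2:])) else "YES"
-- ===== Notes on version B (the rewrite author's own statement) =====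
-- stated objective: alternative
-- what changed: Replaces the frequency-dictionary build followed by a key scan with sorting the list and a single zip scan that looks for two equal values at distance 2 (a run of three equal elements).
import Mathlib
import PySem

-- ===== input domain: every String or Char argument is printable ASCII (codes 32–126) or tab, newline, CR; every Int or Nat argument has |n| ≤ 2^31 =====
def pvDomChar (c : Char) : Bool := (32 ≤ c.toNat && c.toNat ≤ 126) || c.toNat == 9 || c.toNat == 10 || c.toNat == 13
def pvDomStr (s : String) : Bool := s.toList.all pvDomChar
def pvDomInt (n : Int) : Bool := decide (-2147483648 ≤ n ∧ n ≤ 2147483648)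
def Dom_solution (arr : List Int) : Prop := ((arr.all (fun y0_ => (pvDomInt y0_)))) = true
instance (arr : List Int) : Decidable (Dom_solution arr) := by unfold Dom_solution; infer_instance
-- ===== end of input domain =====

-- B replaces A's frequency-dictionary build-then-inspect by sort + one scan for two equal
-- values at distance 2 (an alternative decomposition; not measurably faster).

-- ===== PORT A =====
def solution (arr : List Int) : String :=
  let myDict : PySem.Dict Int Int :=
    (PySem.List.pyRange 0 (PySem.List.len arr) 1).foldl
      (fun d i =>
        if d.contains (PySem.List.pyGetD arr i 0) then
          d.insert (PySem.List.pyGetD arr i 0) (d.getD (PySem.List.pyGetD arr i 0) 0 + 1)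
        else
          d.insert (PySem.List.pyGetD arr i 0) 1)
      PySem.Dict.empty
  -- 'for i in myDict: if myDict[i] > 2: return "NO"' — early return on the first key with count > 2
  if myDict.keys.any (fun k => 2 < myDict.getD k 0) then "NO" else "YES"

-- ===== PORT B =====
def solution_alt (arr : List Int) : String :=
  let s := PySem.List.sorted arr (fun x => x) false
  if (s.zip (PySem.List.slice s (some 2) none)).any (fun p => p.1 == p.2) then "NO" else "YES"

-- ===== PRECONDITION & SPEC =====
def Spec_solution (arr : List Int) (out : String) : Prop := out = solution_alt arr
instance (arr : List Int) (out : String) : Decidable (Spec_solution arr out) := by unfold Spec_solution; infer_instance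

-- ===== CLAIM (what is proved, stated in full; the proofs are below) =====
def Claim_equal_solution : Prop := ∀ (arr : List Int), Dom_solution arr → Spec_solution arr (solution arr)

-- ===== LEMMAS AND PROOFS =====

-- A's fold is the counter fold: when the key is absent, getD = 0, so both branches insert getD+1.
theorem solution_dict_eq_counter (arr : List Int) :
    (arr.foldl
      (fun (d : PySem.Dict Int Int) x =>
        if d.contains x then d.insert x (d.getD x 0 + 1) else d.insert x 1)
      PySem.Dict.empty) = PySem.Dict.counter arr := by
  rw [← PySem.Dict.foldl_insert_getD_add_one_eq_counter]
  have hf : (fun (d : PySem.Dict Int Int) x =>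
      if d.contains x then d.insert x (d.getD x 0 + 1) else d.insert x 1)
      = (fun (d : PySem.Dict Int Int) x => d.insert x (d.getD x 0 + 1)) := by
    funext d x
    by_cases h : d.contains x = true
    · rw [if_pos h]
    · rw [if_neg h, PySem.Dict.getD_of_not_contains d 0 (by simpa using h), zero_add]
  rw [hf]

-- A returns "NO" iff some element of arr occurs more than twice.
theorem solution_eq_iff (arr : List Int) :
    solution arr = (if ∃ x ∈ arr, 3 ≤ arr.count x then "NO" else "YES") := by
  simp only [solution]
  have key : (PySem.List.pyRange 0 (PySem.List.len arr) 1).foldl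
      (fun (d : PySem.Dict Int Int) i =>
        if d.contains (PySem.List.pyGetD arr i 0) then
          d.insert (PySem.List.pyGetD arr i 0) (d.getD (PySem.List.pyGetD arr i 0) 0 + 1)
        else
          d.insert (PySem.List.pyGetD arr i 0) 1)
      PySem.Dict.empty
      = PySem.Dict.counter arr := by
    have := PySem.List.foldl_pyRange_zero_pyGetD arr 0
      (fun (d : PySem.Dict Int Int) x =>
        if d.contains x then d.insert x (d.getD x 0 + 1) else d.insert x 1)
      PySem.Dict.empty
    exact this.trans (solution_dict_eq_counter arr)
  rw [key]
  simp only [PySem.Dict.keys_counter, PySem.Dict.getD_counter]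
  congr 1
  simp only [List.any_eq_true, decide_eq_true_eq, eq_iff_iff]
  constructor
  · rintro ⟨k, hk, h⟩
    exact ⟨k, by simpa using (PySem.Set.mem_ofList arr k).mp hk, by omega⟩
  · rintro ⟨k, hk, h⟩
    exact ⟨k, (PySem.Set.mem_ofList arr k).mpr (by simpa using hk), by omega⟩

-- The distance-2 scan on a weakly increasing list detects exactly a triple occurrence.
theorem zip_drop2_iff_count (s : List Int) (hs : s.Pairwise (· ≤ ·)) :
    ((s.zip (s.drop 2)).any (fun p => p.1 == p.2) = true) ↔ ∃ x, 3 ≤ s.count x := by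
  induction s with
  | nil => simp
  | cons a t ih =>
    match t, hs with
    | [], _ =>
      refine iff_of_false (by simp) ?_
      rintro ⟨x, hx⟩
      have := List.count_le_length (a := x) (l := [a])
      simp at this; omega
    | [b], _ =>
      refine iff_of_false (by simp) ?_
      rintro ⟨x, hx⟩
      have := List.count_le_length (a := x) (l := [a, b])
      simp at this; omega
    | b :: c :: r, hs =>
      have hab : a ≤ b := (List.pairwise_cons.mp hs).1 b (by simp)
      have hac : a ≤ c := (List.pairwise_cons.mp hs).1 c (by simp)
      have htail : (b :: c :: r).Pairwise (· ≤ ·) := (List.pairwise_cons.mp hs).2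
      have hbc : b ≤ c := (List.pairwise_cons.mp htail).1 c (by simp)
      have hcr : ∀ y ∈ r, c ≤ y :=
        (List.pairwise_cons.mp (List.pairwise_cons.mp htail).2).1
      have ih' := ih htail
      simp only [List.drop_succ_cons, List.drop_zero, List.zip_cons_cons, List.any_cons,
        Bool.or_eq_true, beq_iff_eq] at ih' ⊢
      constructor
      · rintro (h | h)
        · -- a = c, hence a = b = c: three copies of a
          refine ⟨a, ?_⟩
          have hb : b = a := le_antisymm (by omega) hab
          subst hb
          rw [← h]
          simp
        · rcases ih'.mp h with ⟨x, hx⟩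
          refine ⟨x, le_trans hx ?_⟩
          conv_rhs => rw [List.count_cons]
          split <;> omega
      · rintro ⟨x, hx⟩
        by_cases hac' : a = c
        · exact Or.inl hac'
        · right
          rw [ih']
          refine ⟨x, ?_⟩
          by_cases hxa : x = a
          · -- a ≠ c and x = a: a occurs at most twice (positions 0 and 1), contradiction
            exfalso
            subst hxa
            have hr : r.count x = 0 := by
              rw [List.count_eq_zero]
              intro hmem
              have := hcr x hmem
              omega
            have hxc : c ≠ x := fun e => hac' e.symm
            rw [List.count_cons_self, List.count_cons, List.count_cons_of_ne hxc, hr] at hx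
            split at hx <;> omega
          · rwa [List.count_cons_of_ne (fun e => hxa e.symm)] at hx

-- B returns "NO" iff some element of arr occurs more than twice.
theorem solution_alt_eq_iff (arr : List Int) :
    solution_alt arr = (if ∃ x ∈ arr, 3 ≤ arr.count x then "NO" else "YES") := by
  simp only [solution_alt]
  have hperm : (PySem.List.sorted arr (fun x => x) false).Perm arr := PySem.List.sorted_perm ..
  have hpw : (PySem.List.sorted arr (fun x => x) false).Pairwise (· ≤ ·) := by
    simpa using PySem.List.sorted_pairwise arr (fun x => x)
  rw [PySem.List.slice_from (PySem.List.sorted arr (fun x => x) false)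
    (by norm_num : (0:Int) ≤ 2)]
  have h2 : (Int.toNat 2) = 2 := rfl
  rw [h2]
  congr 1
  rw [eq_iff_iff, zip_drop2_iff_count _ hpw]
  constructor
  · rintro ⟨x, hx⟩
    rw [hperm.count_eq] at hx
    exact ⟨x, List.count_pos_iff.mp (by omega), hx⟩
  · rintro ⟨x, _, hx⟩
    exact ⟨x, by rw [hperm.count_eq]; exact hx⟩

-- ===== VERDICT (by name: the statement is the Claim_ definition above) =====
theorem solution_spec : Claim_equal_solution := by
  intro arr _
  unfold Spec_solution
  rw [solution_eq_iff, solution_alt_eq_iff]
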